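-- pv_equiv track=rewrite | github.com/gh0stintheshe11/LeetCode-Solutions | solutions/3310.remove-methods-from-project/Python3.py | calculate_suspicious_nodes
-- ===== SOURCE A (Python) =====
-- def calculate_suspicious_nodes(graph, k):
--     suspicious = set()
--
--     def dfs(node):
--         suspicious.add(node)
--         for adj in graph[node]:
--             if adj not in suspicious:
--                 dfs(adj)
--
--     dfs(k)
--     return suspicious
-- ===== SOURCE B (Python) =====
-- def calculate_suspicious_nodes(graph, k):
--     suspicious = set()
--     stack = [k]
--     while stack:
--         node = stack.pop()
--         if node in suspicious:
--             continue
--         suspicious.add(node)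
--         for adj in reversed(graph[node]):
--             stack.append(adj)
--     return suspicious
-- ===== Notes on version B (the rewrite author's own statement) =====
-- stated objective: alternative
-- what changed: A's recursive DFS with a nested closure is replaced by an iterative DFS over an explicit stack (push reversed neighbours, pop from the end), building the same visited set in the same insertion order.
-- outside the precondition, e.g. on calculate_suspicious_nodes({0: [], 1: [2]}, 0): A returns {0}, B returns {0}
import Mathlib
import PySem

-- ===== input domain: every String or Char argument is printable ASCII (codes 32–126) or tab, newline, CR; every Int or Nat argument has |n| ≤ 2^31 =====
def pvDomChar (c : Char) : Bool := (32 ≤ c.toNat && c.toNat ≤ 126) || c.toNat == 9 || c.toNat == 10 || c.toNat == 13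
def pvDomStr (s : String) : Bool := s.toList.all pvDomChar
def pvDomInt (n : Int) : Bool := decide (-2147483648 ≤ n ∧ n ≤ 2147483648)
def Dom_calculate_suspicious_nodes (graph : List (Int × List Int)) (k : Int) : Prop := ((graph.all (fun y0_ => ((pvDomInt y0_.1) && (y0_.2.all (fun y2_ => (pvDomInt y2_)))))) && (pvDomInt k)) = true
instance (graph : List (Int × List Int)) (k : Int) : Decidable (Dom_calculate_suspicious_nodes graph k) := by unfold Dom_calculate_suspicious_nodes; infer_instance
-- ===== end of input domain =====

-- B replaces A's recursive DFS by an iterative DFS with an explicit stack (same result set,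
-- same insertion order); objective: alternative decomposition, no asymptotic change.

-- ===== PORT A =====
-- graph[node]: Python dict lookup; inside Pre_ the key is always present, so getD [] is never taken.
def pvAdj (graph : List (Int × List Int)) (node : Int) : List Int :=
  ((PySem.Dict.ofList graph).get? node).getD []

-- fuel: totality guard only; one unit is consumed per dfs call / per newly added node,
-- and at most (number of possible nodes) additions can happen, so this fuel never runs out.
def pvFuel (graph : List (Int × List Int)) (k : Int) : Nat :=
  (k :: graph.flatMap (fun p => p.2)).length + 1

-- the recursive dfs of A (fuel-guarded structural recursion)
def dfsA (graph : List (Int × List Int)) : Nat → PySem.Set Int → Int → PySem.Set Int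
  | 0, susp, _ => susp
  | fuel + 1, susp, node =>
      (pvAdj graph node).foldl
        (fun s adj => if PySem.Set.contains s adj then s else dfsA graph fuel s adj)
        (PySem.Set.add susp node)

def calculate_suspicious_nodes (graph : List (Int × List Int)) (k : Int) : List Int :=
  dfsA graph (pvFuel graph k) PySem.Set.empty k

-- ===== PORT B =====
-- Source B's while-loop over an explicit stack.  The Lean list holds the stack TOP-FIRST, so
-- Python's "push reversed(graph[node]); pop from the end" is "pvAdj graph node ++ rest".
-- fuel is the totality guard (consumed only when a new node is added).
def loopB (graph : List (Int × List Int)) (fuel : Nat) (susp : PySem.Set Int) (stack : List Int) : PySem.Set Int :=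
  match stack with
  | [] => susp
  | node :: rest =>
      if PySem.Set.contains susp node then loopB graph fuel susp rest
      else
        match fuel with
        | 0 => susp
        | f + 1 => loopB graph f (PySem.Set.add susp node) (pvAdj graph node ++ rest)
termination_by (fuel, stack.length)

def calculate_suspicious_nodes_alt (graph : List (Int × List Int)) (k : Int) : List Int :=
  loopB graph (pvFuel graph k) PySem.Set.empty [k]

-- ===== PRECONDITION & SPEC =====
-- Pre_ excludes the inputs on which the Python raises KeyError: it requires k and every listed
-- neighbour to be a key of graph.  This is slightly stronger than "every REACHABLE node is a
-- key" (the exact raise condition, which is not closed-form); on the excluded-but-returning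
-- inputs (an unreachable missing neighbour) A and B return the same set anyway.
def Pre_calculate_suspicious_nodes (graph : List (Int × List Int)) (k : Int) : Prop :=
  k ∈ graph.map Prod.fst ∧ ∀ p ∈ graph, ∀ a ∈ p.2, a ∈ graph.map Prod.fst
instance (graph : List (Int × List Int)) (k : Int) : Decidable (Pre_calculate_suspicious_nodes graph k) := by unfold Pre_calculate_suspicious_nodes; infer_instance

def pvWitness_calculate_suspicious_nodes : (List (Int × List Int)) × Int := ([(0, [1]), (1, [0, 2]), (2, [])], 0)

def Spec_calculate_suspicious_nodes (graph : List (Int × List Int)) (k : Int) (out : List Int) : Prop := out = calculate_suspicious_nodes_alt graph k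
instance (graph : List (Int × List Int)) (k : Int) (out : List Int) : Decidable (Spec_calculate_suspicious_nodes graph k out) := by unfold Spec_calculate_suspicious_nodes; infer_instance

-- ===== CLAIM (what is proved, stated in full; the proofs are below) =====
def Claim_equal_calculate_suspicious_nodes : Prop := ∀ (graph : List (Int × List Int)) (k : Int), Dom_calculate_suspicious_nodes graph k → Pre_calculate_suspicious_nodes graph k → Spec_calculate_suspicious_nodes graph k (calculate_suspicious_nodes graph k)

-- ===== LEMMAS AND PROOFS =====

-- the universe of every node dfs can ever visit: k and all listed neighbours
def pvU (graph : List (Int × List Int)) (k : Int) : List Int :=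
  k :: graph.flatMap (fun p => p.2)

-- number of universe entries not yet visited (the decreasing measure)
def mset (Ul : List Int) (s : PySem.Set Int) : Nat :=
  Ul.countP (fun x => decide (x ∉ s))

-- the step function of A's inner for-loop, abstracted over the fuel
def pvStep (graph : List (Int × List Int)) (f : Nat) : PySem.Set Int → Int → PySem.Set Int :=
  fun s adj => if PySem.Set.contains s adj then s else dfsA graph f s adj

lemma dfsA_succ (graph : List (Int × List Int)) (f : Nat) (s : PySem.Set Int) (node : Int) :
    dfsA graph (f + 1) s node = (pvAdj graph node).foldl (pvStep graph f) (PySem.Set.add s node) := rfl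

lemma contains_eq_mem (s : PySem.Set Int) (x : Int) : PySem.Set.contains s x = true ↔ x ∈ s := by
  simp [PySem.Set.contains]

lemma subset_add (s : PySem.Set Int) (x : Int) : s ⊆ PySem.Set.add s x := by
  intro a ha; rw [PySem.Set.mem_add]; exact Or.inl ha

lemma subset_dfsA (graph : List (Int × List Int)) :
    ∀ (f : Nat) (s : PySem.Set Int) (node : Int), s ⊆ dfsA graph f s node := by
  intro f
  induction f with
  | zero => intro s node; simp [dfsA]
  | succ f ihf =>
      have hstep : ∀ (s : PySem.Set Int) (a : Int), s ⊆ pvStep graph f s a := by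
        intro s a; unfold pvStep; split
        · exact fun _ h => h
        · exact ihf s a
      have hfold : ∀ (l : List Int) (s : PySem.Set Int), s ⊆ l.foldl (pvStep graph f) s := by
        intro l
        induction l with
        | nil => intro s; simp
        | cons a l ih =>
            intro s
            simp only [List.foldl_cons]
            exact (hstep s a).trans (ih _)
      intro s node
      rw [dfsA_succ]
      exact (subset_add s node).trans (hfold _ _)

lemma mset_mono (Ul : List Int) {s t : PySem.Set Int} (h : s ⊆ t) : mset Ul t ≤ mset Ul s := by
  apply List.countP_mono_left
  intro a _ hp
  simp only [decide_eq_true_eq] at hp ⊢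
  exact fun hs => hp (h hs)

lemma countP_lt_of_witness {α : Type} (l : List α) (p q : α → Bool)
    (himp : ∀ a ∈ l, p a = true → q a = true) (x : α) (hx : x ∈ l)
    (hpx : p x = false) (hqx : q x = true) : l.countP p < l.countP q := by
  induction l with
  | nil => cases hx
  | cons b l ih =>
      simp only [List.countP_cons]
      rcases List.mem_cons.mp hx with rfl | hx'
      · have hle : l.countP p ≤ l.countP q :=
          List.countP_mono_left (fun a ha => himp a (List.mem_cons_of_mem _ ha))
        simp [hpx, hqx]; omega
      · have h1 := ih (fun a ha => himp a (List.mem_cons_of_mem _ ha)) hx'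
        by_cases hb : p b = true
        · have := himp b (List.mem_cons_self) hb
          simp [hb, this]; omega
        · simp only [Bool.not_eq_true] at hb
          simp [hb]; omega

lemma mset_strict (Ul : List Int) (s : PySem.Set Int) (node : Int)
    (hU : node ∈ Ul) (hs : node ∉ s) : mset Ul (PySem.Set.add s node) < mset Ul s := by
  apply countP_lt_of_witness _ _ _ _ node hU
  · simp [PySem.Set.mem_add]
  · simpa using hs
  · intro a _ hp
    simp only [decide_eq_true_eq, PySem.Set.mem_add] at hp ⊢
    exact fun ha => hp (Or.inl ha)

lemma mset_pos (Ul : List Int) (s : PySem.Set Int) (node : Int)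
    (hU : node ∈ Ul) (hs : node ∉ s) : 0 < mset Ul s := by
  rw [mset, List.countP_pos_iff]
  exact ⟨node, hU, by simpa using hs⟩

lemma get?_update_mem (n : Int) (v : List Int) :
    ∀ (g : List (Int × List Int)) (d : PySem.Dict Int (List Int)),
      (d.update g).get? n = some v → (n, v) ∈ g ∨ d.get? n = some v := by
  intro g
  induction g with
  | nil => intro d h; exact Or.inr h
  | cons p g ih =>
      intro d h
      have h' : ((d.insert p.1 p.2).update g).get? n = some v := h
      rcases ih _ h' with hg | hd
      · exact Or.inl (List.mem_cons_of_mem _ hg)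
      · rw [PySem.Dict.get?_insert] at hd
        by_cases hn : n = p.1
        · subst hn
          rw [if_pos rfl] at hd
          have hv : p.2 = v := Option.some.inj hd
          exact Or.inl (by rw [← hv]; exact (by simp : (p.1, p.2) ∈ p :: g))
        · rw [if_neg hn] at hd
          exact Or.inr hd

lemma adj_sub (graph : List (Int × List Int)) (k node a : Int)
    (ha : a ∈ pvAdj graph node) : a ∈ pvU graph k := by
  unfold pvAdj at ha
  cases hg : (PySem.Dict.ofList graph).get? node with
  | none => rw [hg] at ha; simp at ha
  | some l =>
      rw [hg] at ha
      simp only [Option.getD_some] at ha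
      have := get?_update_mem node l graph PySem.Dict.empty hg
      rcases this with hmem | hemp
      · exact List.mem_cons_of_mem _ (List.mem_flatMap.mpr ⟨(node, l), hmem, ha⟩)
      · rw [PySem.Dict.get?_empty] at hemp; cases hemp

lemma dfsA_fuel_irrel (graph : List (Int × List Int)) (k : Int) :
    ∀ (n f g : Nat) (s : PySem.Set Int) (node : Int),
      mset (pvU graph k) s = n → node ∈ pvU graph k → node ∉ s →
      n ≤ f → n ≤ g → dfsA graph f s node = dfsA graph g s node := by
  intro n
  induction n using Nat.strong_induction_on with
  | _ n IH =>
    intro f g s node hn hU hs hf hg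
    have hpos : 0 < n := hn ▸ mset_pos _ s node hU hs
    cases f with
    | zero => omega
    | succ f1 =>
      cases g with
      | zero => omega
      | succ g1 =>
        rw [dfsA_succ, dfsA_succ]
        have inner : ∀ (l : List Int), (∀ a ∈ l, a ∈ pvU graph k) →
            ∀ (t : PySem.Set Int), mset (pvU graph k) t < n →
              mset (pvU graph k) t ≤ f1 → mset (pvU graph k) t ≤ g1 →
              l.foldl (pvStep graph f1) t = l.foldl (pvStep graph g1) t := by
          intro l
          induction l with
          | nil => intro _ t _ _ _; rfl
          | cons a l ihl =>
              intro hl t ht hf1 hg1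
              simp only [List.foldl_cons, pvStep]
              by_cases hm : a ∈ t
              · rw [if_pos ((contains_eq_mem t a).mpr hm), if_pos ((contains_eq_mem t a).mpr hm)]
                exact ihl (fun b hb => hl b (List.mem_cons_of_mem _ hb)) t ht hf1 hg1
              · have hc : ¬ PySem.Set.contains t a = true := fun h => hm ((contains_eq_mem t a).mp h)
                rw [if_neg hc, if_neg hc]
                have hd : dfsA graph f1 t a = dfsA graph g1 t a :=
                  IH (mset (pvU graph k) t) ht f1 g1 t a rfl (hl a List.mem_cons_self) hm hf1 hg1
                rw [hd]
                have hsub : t ⊆ dfsA graph g1 t a := subset_dfsA graph g1 t a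
                have hle := mset_mono (pvU graph k) hsub
                exact ihl (fun b hb => hl b (List.mem_cons_of_mem _ hb)) _
                  (lt_of_le_of_lt hle ht) (le_trans hle hf1) (le_trans hle hg1)
        have hlt : mset (pvU graph k) (PySem.Set.add s node) < n :=
          hn ▸ mset_strict _ s node hU hs
        exact inner (pvAdj graph node) (fun a ha => adj_sub graph k node a ha)
          (PySem.Set.add s node) hlt (by omega) (by omega)

lemma foldCong (graph : List (Int × List Int)) (k : Int) :
    ∀ (l : List Int) (s : PySem.Set Int) (f g : Nat), (∀ a ∈ l, a ∈ pvU graph k) →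
      mset (pvU graph k) s ≤ f → mset (pvU graph k) s ≤ g →
      l.foldl (pvStep graph f) s = l.foldl (pvStep graph g) s := by
  intro l
  induction l with
  | nil => intro s f g _ _ _; rfl
  | cons a l ihl =>
      intro s f g hl hf hg
      simp only [List.foldl_cons, pvStep]
      by_cases hm : a ∈ s
      · rw [if_pos ((contains_eq_mem s a).mpr hm), if_pos ((contains_eq_mem s a).mpr hm)]
        exact ihl s f g (fun b hb => hl b (List.mem_cons_of_mem _ hb)) hf hg
      · have hc : ¬ PySem.Set.contains s a = true := fun h => hm ((contains_eq_mem s a).mp h)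
        rw [if_neg hc, if_neg hc]
        have hd : dfsA graph f s a = dfsA graph g s a :=
          dfsA_fuel_irrel graph k (mset (pvU graph k) s) f g s a rfl
            (hl a List.mem_cons_self) hm hf hg
        rw [hd]
        have hle := mset_mono (pvU graph k) (subset_dfsA graph g s a)
        exact ihl _ f g (fun b hb => hl b (List.mem_cons_of_mem _ hb))
          (le_trans hle hf) (le_trans hle hg)

lemma loopB_nil (graph : List (Int × List Int)) (f : Nat) (s : PySem.Set Int) :
    loopB graph f s [] = s := by rw [loopB.eq_def]

lemma loopB_cons_mem (graph : List (Int × List Int)) (f : Nat) (s : PySem.Set Int)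
    (node : Int) (rest : List Int) (h : node ∈ s) :
    loopB graph f s (node :: rest) = loopB graph f s rest := by
  rw [loopB.eq_def]
  simp [h]

lemma loopB_cons_not_mem (graph : List (Int × List Int)) (f : Nat) (s : PySem.Set Int)
    (node : Int) (rest : List Int) (h : node ∉ s) :
    loopB graph (f + 1) s (node :: rest) =
      loopB graph f (PySem.Set.add s node) (pvAdj graph node ++ rest) := by
  rw [loopB.eq_def]
  simp [h]

lemma foldl_step_subset (graph : List (Int × List Int)) (f : Nat) :
    ∀ (l : List Int) (s : PySem.Set Int), s ⊆ l.foldl (pvStep graph f) s := by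
  intro l
  induction l with
  | nil => intro s; exact fun a ha => ha
  | cons a l ih =>
      intro s
      simp only [List.foldl_cons]
      have hstep : s ⊆ pvStep graph f s a := by
        unfold pvStep; split
        · exact fun _ h => h
        · exact subset_dfsA graph f s a
      exact hstep.trans (ih _)

lemma loopB_eq_foldl (graph : List (Int × List Int)) (k : Int) :
    ∀ (n f g : Nat) (s : PySem.Set Int) (stack : List Int),
      mset (pvU graph k) s = n → (∀ x ∈ stack, x ∈ pvU graph k) →
      mset (pvU graph k) s ≤ f → mset (pvU graph k) s ≤ g →
      loopB graph f s stack = stack.foldl (pvStep graph g) s := by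
  intro n
  induction n using Nat.strong_induction_on with
  | _ n IH =>
    intro f g s stack hn hst hf hg
    induction stack with
    | nil => rw [loopB_nil]; rfl
    | cons node rest ihstack =>
      by_cases hm : node ∈ s
      · rw [loopB_cons_mem graph f s node rest hm]
        have hss : pvStep graph g s node = s := by
          unfold pvStep; rw [if_pos ((contains_eq_mem s node).mpr hm)]
        simp only [List.foldl_cons, hss]
        exact ihstack (fun x hx => hst x (List.mem_cons_of_mem _ hx))
      · have hU : node ∈ pvU graph k := hst node List.mem_cons_self
        have hpos : 0 < mset (pvU graph k) s := mset_pos _ s node hU hm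
        cases f with
        | zero => omega
        | succ f1 =>
          cases g with
          | zero => omega
          | succ g1 =>
            rw [loopB_cons_not_mem graph f1 s node rest hm]
            have hlt : mset (pvU graph k) (PySem.Set.add s node) < n :=
              hn ▸ mset_strict _ s node hU hm
            have hrec := IH (mset (pvU graph k) (PySem.Set.add s node)) hlt f1 g1
              (PySem.Set.add s node) (pvAdj graph node ++ rest) rfl
              (by
                intro x hx
                rcases List.mem_append.mp hx with h1 | h2
                · exact adj_sub graph k node x h1
                · exact hst x (List.mem_cons_of_mem _ h2))
              (by omega) (by omega)
            rw [hrec, List.foldl_append]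
            have hA : (pvAdj graph node).foldl (pvStep graph g1) (PySem.Set.add s node) =
                dfsA graph (g1 + 1) s node := (dfsA_succ graph g1 s node).symm
            rw [hA]
            have hsub : PySem.Set.add s node ⊆ dfsA graph (g1 + 1) s node := by
              rw [dfsA_succ]; exact foldl_step_subset graph g1 _ _
            have hle : mset (pvU graph k) (dfsA graph (g1 + 1) s node) ≤
                mset (pvU graph k) (PySem.Set.add s node) := mset_mono _ hsub
            have hcong := foldCong graph k rest (dfsA graph (g1 + 1) s node) g1 (g1 + 1)
              (fun x hx => hst x (List.mem_cons_of_mem _ hx))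
              (by omega) (by omega)
            rw [hcong]
            have hstepn : pvStep graph (g1 + 1) s node = dfsA graph (g1 + 1) s node := by
              unfold pvStep
              rw [if_neg (fun hc => hm ((contains_eq_mem s node).mp hc))]
            simp only [List.foldl_cons, hstepn]

-- ===== VERDICT (by name: the statement is the Claim_ definition above) =====
theorem calculate_suspicious_nodes_spec : Claim_equal_calculate_suspicious_nodes := by
  unfold Claim_equal_calculate_suspicious_nodes
  intro graph k _ _
  unfold Spec_calculate_suspicious_nodes
  unfold calculate_suspicious_nodes calculate_suspicious_nodes_alt
  have hF : mset (pvU graph k) PySem.Set.empty ≤ pvFuel graph k := by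
    have h1 : mset (pvU graph k) PySem.Set.empty ≤ (pvU graph k).length :=
      List.countP_le_length
    have h2 : pvFuel graph k = (pvU graph k).length + 1 := rfl
    omega
  have h := loopB_eq_foldl graph k (mset (pvU graph k) PySem.Set.empty)
    (pvFuel graph k) (pvFuel graph k) PySem.Set.empty [k] rfl
    (by
      intro x hx
      rw [List.mem_singleton] at hx
      subst hx
      exact List.mem_cons_self)
    hF hF
  rw [h]
  have hne : (k : Int) ∉ (PySem.Set.empty : PySem.Set Int) := by
    simp [PySem.Set.empty]
  have hstepk : pvStep graph (pvFuel graph k) PySem.Set.empty k =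
      dfsA graph (pvFuel graph k) PySem.Set.empty k := by
    unfold pvStep
    rw [if_neg (fun hc => hne ((contains_eq_mem _ k).mp hc))]
  simp only [List.foldl_cons, List.foldl_nil, hstepk]
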